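-- pv_equiv track=rewrite | github.com/ml-tooling/lazycluster | src/lazycluster/_utils.py | get_remaining_ports
-- ===== SOURCE A (Python) =====
-- from typing import Dict, List, Union
--
-- def get_remaining_ports(ports: List[int], last_used_port: int) -> List[int]:
--     """Get a new list with the remaining ports after cutting out all ports until and incl. the last used port.
--
--     Args:
--         ports (List[int]): The port list to be updated.
--         last_used_port (int): The last port that was actually used. All ports up this one and including this one will
--                               be removed.
--
--     Returns:
--         List with remaining ports
--     """
--     skip = True
--     final_port_list = []
--     for port in ports:
--         if skip:
--             if port == last_used_port:
--                 skip = False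
--             continue
--         final_port_list.append(port)
--     return final_port_list
-- ===== SOURCE B (Python) =====
-- def get_remaining_ports(ports, last_used_port):
--     if last_used_port in ports:
--         return ports[ports.index(last_used_port) + 1:]
--     return []
-- ===== Notes on version B (the rewrite author's own statement) =====
-- stated objective: idiomatic
-- what changed: Replaces A's boolean-flag single-pass accumulator with locating the first occurrence via index() and slicing the tail; not-found is handled by the membership guard.
import Mathlib
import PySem

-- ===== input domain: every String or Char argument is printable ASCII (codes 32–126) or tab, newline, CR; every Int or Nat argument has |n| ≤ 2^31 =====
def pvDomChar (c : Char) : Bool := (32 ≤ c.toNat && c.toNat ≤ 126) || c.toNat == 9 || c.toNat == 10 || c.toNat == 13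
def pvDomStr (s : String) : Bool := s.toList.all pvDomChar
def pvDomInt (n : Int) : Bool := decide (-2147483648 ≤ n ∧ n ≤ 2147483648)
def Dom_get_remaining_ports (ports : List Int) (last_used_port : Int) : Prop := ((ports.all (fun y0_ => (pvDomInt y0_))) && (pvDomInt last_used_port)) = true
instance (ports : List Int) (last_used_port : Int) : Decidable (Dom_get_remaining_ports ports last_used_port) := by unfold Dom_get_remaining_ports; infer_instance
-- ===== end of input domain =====

-- B replaces A's boolean-flag single-pass accumulator with find-the-cut-then-slice (idiomatic, same cost).

-- ===== PORT A =====
-- skip flag + append accumulator, exactly A's loop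
def get_remaining_ports (ports : List Int) (last_used_port : Int) : List Int :=
  (ports.foldl (fun (st : Bool × List Int) port =>
      if st.1 then
        (if port == last_used_port then (false, st.2) else (true, st.2))
      else
        (st.1, st.2 ++ [port]))
    (true, ([] : List Int))).2

-- ===== PORT B =====
-- membership guard, then index of first occurrence, then slice from index+1
def get_remaining_ports_alt (ports : List Int) (last_used_port : Int) : List Int :=
  if ports.contains last_used_port then
    match PySem.List.index? ports last_used_port with
    | some i => PySem.List.slice ports (some ((i : Int) + 1)) none
    | none => []   -- unreachable under the guard (index on a member)
  else []

-- ===== PRECONDITION & SPEC =====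
def Spec_get_remaining_ports (ports : List Int) (last_used_port : Int) (out : List Int) : Prop := out = get_remaining_ports_alt ports last_used_port
instance (ports : List Int) (last_used_port : Int) (out : List Int) : Decidable (Spec_get_remaining_ports ports last_used_port out) := by unfold Spec_get_remaining_ports; infer_instance

-- ===== CLAIM (what is proved, stated in full; the proofs are below) =====
def Claim_equal_get_remaining_ports : Prop := ∀ (ports : List Int) (last_used_port : Int), Dom_get_remaining_ports ports last_used_port → Spec_get_remaining_ports ports last_used_port (get_remaining_ports ports last_used_port)

-- ===== LEMMAS AND PROOFS =====

-- the common value: tail after the first occurrence, [] if absent (proof-only helper)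
def cutSpec (ports : List Int) (l : Int) : List Int :=
  match List.idxOf? l ports with
  | some i => ports.drop (i + 1)
  | none => []

-- once the flag is false, A's loop just appends everything
theorem loopA_false (ports : List Int) (l : Int) (acc : List Int) :
    (ports.foldl (fun (st : Bool × List Int) port =>
      if st.1 then
        (if port == l then (false, st.2) else (true, st.2))
      else
        (st.1, st.2 ++ [port])) (false, acc)) = (false, acc ++ ports) := by
  induction ports generalizing acc with
  | nil => simp
  | cons p rest ih =>
    rw [List.foldl_cons]
    have h : (if (false : Bool) then
        (if p == l then (false, acc) else (true, acc))
      else ((false : Bool), acc ++ [p])) = ((false : Bool), acc ++ [p]) := by simp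
    rw [h, ih]
    simp

theorem portA_eq_cutSpec (ports : List Int) (l : Int) :
    get_remaining_ports ports l = cutSpec ports l := by
  induction ports with
  | nil => rfl
  | cons p rest ih =>
    unfold get_remaining_ports at ih ⊢
    rw [List.foldl_cons]
    by_cases hp : p = l
    · subst hp
      have h : (if (true : Bool) then
          (if p == p then (false, ([] : List Int)) else (true, [])) else (true, [] ++ [p]))
          = ((false : Bool), ([] : List Int)) := by simp
      rw [h, loopA_false]
      simp [cutSpec, List.idxOf?_cons]
    · have h : (if (true : Bool) then
          (if p == l then (false, ([] : List Int)) else (true, [])) else (true, [] ++ [p]))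
          = ((true : Bool), ([] : List Int)) := by simp [hp]
      rw [h, ih]
      have hne : (p == l) = false := by simp [hp]
      simp only [cutSpec, List.idxOf?_cons, hne]
      cases hidx : List.idxOf? l rest with
      | none => simp
      | some i => simp [List.drop]

theorem portB_eq_cutSpec (ports : List Int) (l : Int) :
    get_remaining_ports_alt ports l = cutSpec ports l := by
  unfold get_remaining_ports_alt cutSpec
  rw [PySem.List.index?_eq_idxOf?]
  by_cases hm : l ∈ ports
  · obtain ⟨i, hi⟩ := Option.isSome_iff_exists.mp (List.isSome_idxOf?.mpr hm)
    have hslice : PySem.List.slice ports (some ((i : Int) + 1)) none = ports.drop (i + 1) := by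
      have := PySem.List.slice_from_natCast ports (i + 1)
      push_cast at this
      exact this
    simp [hm, hi, hslice]
  · have : List.idxOf? l ports = none := by
      cases h : List.idxOf? l ports with
      | none => rfl
      | some i => exact absurd (List.isSome_idxOf?.mp (by simp [h])) hm
    simp [hm, this]

-- ===== VERDICT (by name: the statement is the Claim_ definition above) =====
theorem get_remaining_ports_spec : Claim_equal_get_remaining_ports := by
  intro ports l _
  unfold Spec_get_remaining_ports
  rw [portA_eq_cutSpec, portB_eq_cutSpec]
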